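-- pv_equiv track=rewrite | github.com/ttomo3535/power_of_neutrality_tests | constant_pop/my_module/.ipynb_checkpoints/trajectory_given_t_and_p_modified-checkpoint.py | split_history
-- ===== SOURCE A (Python) =====
-- def split_history(demography, ts):
--     # time when selection starts
--     selected = 1
--
--     # initialize
--     under_sel = []
--     under_neu = []
--
--     for s, e, n in demography:
--
--         # trajectory under selection
--         if selected == 1:
--             if ts < e:
--                 under_sel.append([s, ts, n])
--                 under_neu.append([ts, e, n])
--                 selected = 0
--             else:
--                 under_sel.append([s, e, n])
--
--         # neutral trajectory
--         else:
--             under_neu.append([s, e, n])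
--
--     return (under_sel, under_neu)
-- ===== SOURCE B (Python) =====
-- def split_history(demography, ts):
--     demo = list(demography)
--     idx = next((i for i, (s, e, n) in enumerate(demo) if ts < e), None)
--     if idx is None:
--         return ([[s, e, n] for s, e, n in demo], [])
--     s, e, n = demo[idx]
--     under_sel = [[s0, e0, n0] for s0, e0, n0 in demo[:idx]] + [[s, ts, n]]
--     under_neu = [[ts, e, n]] + [[s0, e0, n0] for s0, e0, n0 in demo[idx + 1:]]
--     return (under_sel, under_neu)
-- ===== Notes on version B (the rewrite author's own statement) =====
-- stated objective: alternative
-- what changed: Replaces the stateful selected-flag single pass with a locate-the-boundary-then-slice decomposition: find the first interval with ts < e, then build the selected part from the prefix and the neutral part from the suffix.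
import Mathlib
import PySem

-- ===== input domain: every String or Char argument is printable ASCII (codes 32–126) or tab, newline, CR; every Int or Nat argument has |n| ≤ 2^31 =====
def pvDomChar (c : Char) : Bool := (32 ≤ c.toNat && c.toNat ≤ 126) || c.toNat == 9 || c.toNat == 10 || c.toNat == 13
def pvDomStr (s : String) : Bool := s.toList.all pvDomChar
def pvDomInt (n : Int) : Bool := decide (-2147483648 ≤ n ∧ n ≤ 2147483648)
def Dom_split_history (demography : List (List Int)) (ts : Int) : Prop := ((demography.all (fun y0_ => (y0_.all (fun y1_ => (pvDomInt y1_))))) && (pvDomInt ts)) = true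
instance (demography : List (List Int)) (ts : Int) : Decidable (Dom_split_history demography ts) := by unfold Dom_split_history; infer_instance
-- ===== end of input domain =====

-- B replaces A's stateful selected-flag single pass by locating the first interval
-- with ts < e and slicing the list there (alternative decomposition, same cost).


-- ===== PORT A =====
-- A's loop: state (selected flag, under_sel, under_neu); rows are unpacked as (s,e,n)
-- (a row of length ≠ 3 raises ValueError in Python — excluded by Pre_; the fallback
-- branch here is never reached inside Pre_).
def stepA (ts : Int) (st : Bool × List (List Int) × List (List Int)) (row : List Int) :
    Bool × List (List Int) × List (List Int) :=
  match row with
  | [s, e, n] =>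
      let (sel, us, un) := st
      if sel then
        if ts < e then (false, us ++ [[s, ts, n]], un ++ [[ts, e, n]])
        else (true, us ++ [[s, e, n]], un)
      else (sel, us, un ++ [[s, e, n]])
  | _ => st

def split_history (demography : List (List Int)) (ts : Int) :
    List (List Int) × List (List Int) :=
  let st := demography.foldl (stepA ts) (true, [], [])
  (st.2.1, st.2.2)

-- ===== PORT B =====
-- fresh [s,e,n] copy of a row (Source B's comprehension unpacking; fallback unreachable in Pre_)
def copyRow (row : List Int) : List Int :=
  match row with
  | [s, e, n] => [s, e, n]
  | _ => row

def split_history_alt (demography : List (List Int)) (ts : Int) :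
    List (List Int) × List (List Int) :=
  match demography.findIdx? (fun row =>
      match row with
      | [_, e, _] => decide (ts < e)
      | _ => false) with
  | none => (demography.map copyRow, [])
  | some idx =>
    match demography.drop idx with
    | [] => (demography.map copyRow, [])   -- unreachable: findIdx? index is in range
    | r :: rest =>
      match r with
      | [s, e, n] =>
          ((demography.take idx).map copyRow ++ [[s, ts, n]],
           [[ts, e, n]] ++ rest.map copyRow)
      | _ => (demography.map copyRow, [])  -- unreachable inside Pre_

-- ===== PRECONDITION & SPEC =====
-- Pre_ excludes demographies containing a row whose length is not 3: Python A raises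
-- ValueError (unpacking) there.
def Pre_split_history (demography : List (List Int)) (ts : Int) : Prop :=
  ∀ r ∈ demography, r.length = 3
instance (demography : List (List Int)) (ts : Int) : Decidable (Pre_split_history demography ts) := by unfold Pre_split_history; infer_instance
def pvWitness_split_history : List (List Int) × Int := ([[0, 5, 10], [5, 9, 20]], 7)

def Spec_split_history (demography : List (List Int)) (ts : Int) (out : List (List Int) × List (List Int)) : Prop := out = split_history_alt demography ts
instance (demography : List (List Int)) (ts : Int) (out : List (List Int) × List (List Int)) : Decidable (Spec_split_history demography ts out) := by unfold Spec_split_history; infer_instance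

-- ===== CLAIM (what is proved, stated in full; the proofs are below) =====
def Claim_equal_split_history : Prop := ∀ (demography : List (List Int)) (ts : Int), Dom_split_history demography ts → Pre_split_history demography ts → Spec_split_history demography ts (split_history demography ts)

-- ===== LEMMAS AND PROOFS =====

-- stepA only appends to its accumulators
theorem stepA_append (ts : Int) (sel : Bool) (us un : List (List Int)) (row : List Int) :
    stepA ts (sel, us, un) row =
      ((stepA ts (sel, [], []) row).1,
       us ++ (stepA ts (sel, [], []) row).2.1,
       un ++ (stepA ts (sel, [], []) row).2.2) := by
  match row with
  | [s, e, n] =>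
      simp only [stepA]
      cases sel <;> by_cases h : ts < e <;> simp [h]
  | [] => simp [stepA]
  | [_] => simp [stepA]
  | [_, _] => simp [stepA]
  | _ :: _ :: _ :: _ :: _ => simp [stepA]

theorem foldl_stepA_append (ts : Int) (t : List (List Int)) (sel : Bool)
    (us un : List (List Int)) :
    t.foldl (stepA ts) (sel, us, un) =
      ((t.foldl (stepA ts) (sel, [], [])).1,
       us ++ (t.foldl (stepA ts) (sel, [], [])).2.1,
       un ++ (t.foldl (stepA ts) (sel, [], [])).2.2) := by
  induction t generalizing sel us un with
  | nil => simp
  | cons r t ih =>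
      simp only [List.foldl_cons]
      rw [stepA_append]
      rw [ih]
      conv_rhs => rw [stepA_append, ih]
      simp

-- once selected = 0, the fold just copies every remaining row into under_neu
theorem foldl_stepA_false (ts : Int) (t : List (List Int)) (us un : List (List Int))
    (h : ∀ r ∈ t, r.length = 3) :
    t.foldl (stepA ts) (false, us, un) = (false, us, un ++ t.map copyRow) := by
  induction t generalizing un with
  | nil => simp
  | cons r t ih =>
      have hr : r.length = 3 := h r (by simp)
      match r, hr with
      | [s, e, n], _ =>
          have hstep : stepA ts (false, us, un) [s, e, n] = (false, us, un ++ [[s, e, n]]) := by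
            simp [stepA]
          simp only [List.foldl_cons, hstep, List.map_cons, copyRow]
          rw [ih _ (fun x hx => h x (by simp [hx]))]
          simp

theorem main_eq (ts : Int) (d : List (List Int)) (h : ∀ r ∈ d, r.length = 3) :
    split_history d ts = split_history_alt d ts := by
  induction d with
  | nil => rfl
  | cons r t ih =>
      have hr : r.length = 3 := h r (by simp)
      have ht : ∀ x ∈ t, x.length = 3 := fun x hx => h x (by simp [hx])
      match r, hr with
      | [s, e, n], _ =>
        by_cases hlt : ts < e
        · simp only [split_history, List.foldl_cons, stepA, if_pos hlt, if_true]
          rw [foldl_stepA_false ts t _ _ ht]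
          simp only [split_history_alt, List.findIdx?_cons, hlt, decide_true,
            if_true, List.drop_zero]
          simp
        · have hstep : stepA ts (true, [], []) [s, e, n] = (true, [[s, e, n]], []) := by
            simp [stepA, hlt]
          have hA : split_history ([s, e, n] :: t) ts =
              ([s, e, n] :: (split_history t ts).1, (split_history t ts).2) := by
            simp only [split_history, List.foldl_cons, hstep]
            rw [foldl_stepA_append ts t true [[s, e, n]] []]
            simp
          rw [hA, ih ht]
          simp only [split_history_alt, List.findIdx?_cons, hlt, decide_false,
            Bool.false_eq_true, if_false]
          cases hfi : t.findIdx? (fun row =>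
              match row with
              | [_, e, _] => decide (ts < e)
              | _ => false) with
          | none => simp [copyRow]
          | some idx =>
              have hidx : idx < t.length := (List.findIdx?_eq_some_iff_findIdx_eq.mp hfi).1
              simp only [Option.map_some]
              cases hdrop : t.drop idx with
              | nil =>
                  exfalso
                  have := List.length_drop (l := t) (i := idx)
                  rw [hdrop] at this
                  simp at this
                  omega
              | cons r2 rest =>
                  have hdrop' : ([s,e,n] :: t).drop (idx + 1) = r2 :: rest := by
                    simpa using hdrop
                  have hr2 : r2.length = 3 := by
                    have : r2 ∈ t := by
                      have : r2 ∈ t.drop idx := by rw [hdrop]; simp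
                      exact List.mem_of_mem_drop this
                    exact ht _ this
                  match r2, hr2 with
                  | [s2, e2, n2], _ =>
                      simp [hdrop', copyRow]

-- ===== VERDICT (by name: the statement is the Claim_ definition above) =====
theorem split_history_spec : Claim_equal_split_history := by
  intro d ts _ hpre
  unfold Spec_split_history
  exact main_eq ts d hpre
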